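-- pv_equiv track=rewrite | github.com/vertechieindia/xerobookz | saas-backend/attendance-service/app/services/state_machine.py | compute_state
-- ===== SOURCE A (Python) =====
-- from enum import Enum
-- from typing import List, Optional, Tuple
--
-- class EventType(str, Enum):
--     PUNCH_IN = "PUNCH_IN"
--     PUNCH_OUT = "PUNCH_OUT"
--     BREAK_IN = "BREAK_IN"
--     BREAK_OUT = "BREAK_OUT"
--
-- class WorkState(str, Enum):
--     OFF = "OFF"
--     WORKING = "WORKING"
--     ON_BREAK = "ON_BREAK"
--
-- def compute_state(session_events: List[EventType]) -> WorkState: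
--     """Apply session events in order; return current work state."""
--     state = WorkState.OFF
--     for et in session_events:
--         if et == EventType.PUNCH_IN:
--             if state != WorkState.OFF:
--                 raise ValueError("Invalid: PUNCH_IN when not OFF")
--             state = WorkState.WORKING
--         elif et == EventType.PUNCH_OUT:
--             if state != WorkState.WORKING:
--                 raise ValueError("Invalid: PUNCH_OUT when not WORKING")
--             state = WorkState.OFF
--         elif et == EventType.BREAK_IN:
--             if state != WorkState.WORKING:
--                 raise ValueError("Invalid: BREAK_IN when not WORKING")
--             state = WorkState.ON_BREAK
--         elif et == EventType.BREAK_OUT: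
--             if state != WorkState.ON_BREAK:
--                 raise ValueError("Invalid: BREAK_OUT when not ON_BREAK")
--             state = WorkState.WORKING
--     return state
-- ===== SOURCE B (Python) =====
-- _RESULT = {
--     "PUNCH_IN": "WORKING",
--     "PUNCH_OUT": "OFF",
--     "BREAK_IN": "ON_BREAK",
--     "BREAK_OUT": "WORKING",
-- }
--
-- def compute_state(session_events):
--     """On a valid session, the final state is determined by the last
--     recognized event: scan backwards and map it; no event -> OFF."""
--     for et in reversed(session_events):
--         r = _RESULT.get(et)
--         if r is not None:
--             return r
--     return "OFF"
-- ===== Notes on version B (the rewrite author's own statement) =====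
-- stated objective: alternative
-- what changed: Replaces the forward state-machine fold with a backward scan: on a valid session the final state is fully determined by the last recognized event, so B looks that event up in a result table and returns immediately (no state variable, no per-step validation); sequences on which A raises ValueError are outside Pre_.
import Mathlib
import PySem

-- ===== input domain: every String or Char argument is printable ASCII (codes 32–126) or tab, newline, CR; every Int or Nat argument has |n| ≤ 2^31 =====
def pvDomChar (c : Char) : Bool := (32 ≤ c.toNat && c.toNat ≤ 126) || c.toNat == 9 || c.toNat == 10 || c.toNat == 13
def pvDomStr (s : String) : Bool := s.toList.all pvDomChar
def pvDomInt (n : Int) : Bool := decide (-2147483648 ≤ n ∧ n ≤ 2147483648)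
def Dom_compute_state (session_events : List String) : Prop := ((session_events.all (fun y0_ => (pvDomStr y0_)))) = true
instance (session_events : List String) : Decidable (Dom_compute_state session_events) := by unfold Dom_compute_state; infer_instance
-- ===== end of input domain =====

-- B replaces A's forward validating fold by a backward scan returning the result of the
-- last recognized event (objective: alternative); the claim covers valid sequences (Pre_),
-- i.e. exactly the inputs on which A returns instead of raising ValueError.

-- ===== PORT A =====
-- loop body of A: one transition step; 'none' models the raised ValueError
def stepA (state et : String) : Option String :=
  if et = "PUNCH_IN" then
    (if state ≠ "OFF" then none else some "WORKING")
  else if et = "PUNCH_OUT" then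
    (if state ≠ "WORKING" then none else some "OFF")
  else if et = "BREAK_IN" then
    (if state ≠ "WORKING" then none else some "ON_BREAK")
  else if et = "BREAK_OUT" then
    (if state ≠ "ON_BREAK" then none else some "WORKING")
  else some state

def runA : String → List String → Option String
  | state, [] => some state
  | state, et :: rest =>
    match stepA state et with
    | none => none
    | some state' => runA state' rest

def compute_state (session_events : List String) : String :=
  (runA "OFF" session_events).getD ""   -- the 'none' (raise) case is excluded by Pre_

-- ===== PORT B =====
def tableB : PySem.Dict String String :=
  PySem.Dict.ofList
    [("PUNCH_IN", "WORKING"), ("PUNCH_OUT", "OFF"),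
     ("BREAK_IN", "ON_BREAK"), ("BREAK_OUT", "WORKING")]

def resB (et : String) : Option String := PySem.Dict.get? tableB et

def findB : List String → String
  | [] => "OFF"
  | et :: rest =>
    match resB et with
    | some r => r
    | none => findB rest

def compute_state_alt (session_events : List String) : String :=
  findB session_events.reverse

-- ===== PRECONDITION & SPEC =====
-- Pre_ (closed form): on any other input A raises ValueError. An input is valid iff, in
-- the subsequence of recognized events, each event's REQUIRED state is the RESULT state
-- of the previous recognized event, and the first one's required state is OFF.
def pvRec (et : String) : Bool :=
  et == "PUNCH_IN" || et == "PUNCH_OUT" || et == "BREAK_IN" || et == "BREAK_OUT"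

def pvReq (et : String) : String :=
  if et = "PUNCH_IN" then "OFF"
  else if et = "PUNCH_OUT" then "WORKING"
  else if et = "BREAK_IN" then "WORKING"
  else if et = "BREAK_OUT" then "ON_BREAK"
  else ""

def pvRes (et : String) : String :=
  if et = "PUNCH_IN" then "WORKING"
  else if et = "PUNCH_OUT" then "OFF"
  else if et = "BREAK_IN" then "ON_BREAK"
  else if et = "BREAK_OUT" then "WORKING"
  else ""

-- adjacency check: consecutive recognized events fit (required state of the later
-- equals result state of the earlier)
def pvChain : List String → Bool
  | [] => true
  | [_] => true
  | a :: b :: rest => (pvReq b == pvRes a) && pvChain (b :: rest)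

def Pre_compute_state (session_events : List String) : Prop :=
  ((session_events.filter pvRec).head?.all fun h => pvReq h == "OFF") = true ∧
  pvChain (session_events.filter pvRec) = true

instance (session_events : List String) : Decidable (Pre_compute_state session_events) := by
  unfold Pre_compute_state; infer_instance

def pvWitness_compute_state : List String :=
  ["PUNCH_IN", "BREAK_IN", "BREAK_OUT", "lunch?", "PUNCH_OUT"]

def Spec_compute_state (session_events : List String) (out : String) : Prop := out = compute_state_alt session_events
instance (session_events : List String) (out : String) : Decidable (Spec_compute_state session_events out) := by unfold Spec_compute_state; infer_instance

-- ===== CLAIM (what is proved, stated in full; the proofs are below) =====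
def Claim_equal_compute_state : Prop := ∀ (session_events : List String), Dom_compute_state session_events → Pre_compute_state session_events → Spec_compute_state session_events (compute_state session_events)

-- ===== LEMMAS AND PROOFS =====

-- result of the first recognized event of a list, as an Option (findB = this ⟨getD "OFF"⟩)
def lastRes? : List String → Option String
  | [] => none
  | et :: rest =>
    match resB et with
    | some r => some r
    | none => lastRes? rest

theorem findB_eq_lastRes? (l : List String) : findB l = (lastRes? l).getD "OFF" := by
  induction l with
  | nil => rfl
  | cons et rest ih =>
    simp only [findB, lastRes?]
    cases resB et <;> simp [ih]

theorem lastRes?_append (l : List String) (x : String) :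
    lastRes? (l ++ [x]) =
      match lastRes? l with
      | some r => some r
      | none => resB x := by
  induction l with
  | nil => cases h : resB x <;> simp [lastRes?, h]
  | cons et rest ih =>
    simp only [List.cons_append, lastRes?]
    cases resB et <;> simp [ih]

theorem pvRec_cases (et : String) (h : pvRec et = true) :
    et = "PUNCH_IN" ∨ et = "PUNCH_OUT" ∨ et = "BREAK_IN" ∨ et = "BREAK_OUT" := by
  have := h; simp [pvRec] at this; tauto

theorem pvRec_neqs (et : String) (h : pvRec et = false) :
    et ≠ "PUNCH_IN" ∧ et ≠ "PUNCH_OUT" ∧ et ≠ "BREAK_IN" ∧ et ≠ "BREAK_OUT" := by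
  have := h; simp [pvRec] at this; tauto

theorem resB_of_rec (et : String) (h : pvRec et = true) : resB et = some (pvRes et) := by
  rcases pvRec_cases et h with rfl | rfl | rfl | rfl <;> decide

theorem resB_of_unrec (et : String) (h : pvRec et = false) : resB et = none := by
  obtain ⟨h1, h2, h3, h4⟩ := pvRec_neqs et h
  rw [resB, PySem.Dict.get?_eq_none_iff_not_mem_keys]
  have hk : tableB.keys = ["PUNCH_IN", "PUNCH_OUT", "BREAK_IN", "BREAK_OUT"] := by decide
  rw [hk]
  simp [h1, h2, h3, h4]

theorem stepA_of_rec (et : String) (h : pvRec et = true) :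
    stepA (pvReq et) et = some (pvRes et) := by
  rcases pvRec_cases et h with rfl | rfl | rfl | rfl <;> decide

theorem stepA_of_unrec (s et : String) (h : pvRec et = false) : stepA s et = some s := by
  obtain ⟨h1, h2, h3, h4⟩ := pvRec_neqs et h
  simp [stepA, h1, h2, h3, h4]

-- main invariant: on a chain-valid run from s, A's fold returns the result of the
-- last recognized event, defaulting to the start state s
theorem pvChain_cons (a : String) (l : List String) :
    pvChain (a :: l) = ((l.head?.all fun b => pvReq b == pvRes a) && pvChain l) := by
  cases l <;> simp [pvChain]

theorem runA_eq (evs : List String) : ∀ s,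
    ((evs.filter pvRec).head?.all fun h => pvReq h == s) = true →
    pvChain (evs.filter pvRec) = true →
    runA s evs = some ((lastRes? evs.reverse).getD s) := by
  induction evs with
  | nil => intro s _ _; rfl
  | cons et rest ih =>
    intro s hh hc
    by_cases hr : pvRec et = true
    · rw [List.filter_cons_of_pos hr] at hh hc
      have hreq : pvReq et = s := by simpa using hh
      rw [pvChain_cons, Bool.and_eq_true] at hc
      obtain ⟨hh', hc'⟩ := hc
      have hstep : stepA s et = some (pvRes et) := by rw [← hreq]; exact stepA_of_rec et hr
      simp only [runA, hstep]
      rw [ih (pvRes et) hh' hc', List.reverse_cons, lastRes?_append]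
      cases lastRes? rest.reverse with
      | some r => rfl
      | none => simp [resB_of_rec et hr]
    · have hr' : pvRec et = false := by simpa using hr
      rw [List.filter_cons_of_neg (by simp [hr'])] at hh hc
      simp only [runA, stepA_of_unrec s et hr']
      rw [ih s hh hc, List.reverse_cons, lastRes?_append]
      cases lastRes? rest.reverse with
      | some r => rfl
      | none => simp [resB_of_unrec et hr']

-- ===== VERDICT (by name: the statement is the Claim_ definition above) =====
theorem compute_state_spec : Claim_equal_compute_state := by
  intro evs _ hpre
  obtain ⟨hh, hc⟩ := hpre
  unfold Spec_compute_state compute_state compute_state_alt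
  rw [runA_eq evs "OFF" hh hc, findB_eq_lastRes?]
  rfl
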